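-- pv_equiv track=rewrite | github.com/Kidus-M/A2SV_leetcode- | Codeforces - A2SV G6 - merged 8/E_Merge_Sort.py | build
-- ===== SOURCE A (Python) =====
-- def build(l, r, swaps_left, perm, val):
--     if l >= r:
--         return swaps_left
--     if l + 1 == r:
--         perm[l] = val[0]
--         val[0] += 1
--         return swaps_left
--
--     mid = (l + r) // 2
--
--     swaps_left = build(l, mid, swaps_left, perm, val)
--     swaps_left = build(mid, r, swaps_left, perm, val)
--
--     if swaps_left > 0:
--         perm[mid - 1], perm[mid] = perm[mid], perm[mid - 1]
--         swaps_left -= 1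
--
--     return swaps_left
-- ===== SOURCE B (Python) =====
-- def build(l, r, swaps_left, perm, val):
--     if r <= l:
--         return swaps_left
--     # leaf visits just write consecutive integers left-to-right
--     base = val[0]
--     for i in range(l, r):
--         perm[i] = base + (i - l)
--     val[0] = base + (r - l)
--     # post-order midpoints of the internal nodes of the merge-sort tree
--     mids = []
--     _mids(l, r, mids)
--     # consume the swap budget along that sequence
--     for mid in mids:
--         if swaps_left <= 0:
--             break
--         perm[mid - 1], perm[mid] = perm[mid], perm[mid - 1]
--         swaps_left -= 1
--     return swaps_left
--
--
-- def _mids(lo, hi, acc):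
--     if hi - lo >= 2:
--         mid = (lo + hi) // 2
--         _mids(lo, mid, acc)
--         _mids(mid, hi, acc)
--         acc.append(mid)
-- ===== Notes on version B (the rewrite author's own statement) =====
-- stated objective: alternative
-- what changed: A threads the swap budget through one recursion that interleaves leaf writes and swaps; B separates the three concerns: an arithmetic fill of consecutive values, a post-order list of internal-node midpoints, and one linear loop that consumes the swap budget (with an early break).
import Mathlib
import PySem

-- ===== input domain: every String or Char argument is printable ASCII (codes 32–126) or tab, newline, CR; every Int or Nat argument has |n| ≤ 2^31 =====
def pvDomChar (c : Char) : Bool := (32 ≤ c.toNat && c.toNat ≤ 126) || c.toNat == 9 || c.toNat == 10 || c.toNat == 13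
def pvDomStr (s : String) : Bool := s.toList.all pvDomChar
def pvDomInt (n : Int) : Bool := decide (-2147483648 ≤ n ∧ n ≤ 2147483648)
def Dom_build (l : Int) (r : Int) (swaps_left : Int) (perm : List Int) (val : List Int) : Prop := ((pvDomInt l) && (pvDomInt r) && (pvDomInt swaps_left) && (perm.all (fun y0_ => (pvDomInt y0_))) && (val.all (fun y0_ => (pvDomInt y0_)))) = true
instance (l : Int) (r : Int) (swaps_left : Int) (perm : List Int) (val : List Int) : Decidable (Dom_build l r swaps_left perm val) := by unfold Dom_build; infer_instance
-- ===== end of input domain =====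

-- B replaces A's single budget-threading recursion by three separate phases (arithmetic fill,
-- post-order midpoint list, linear budget loop); both mutate perm/val in place in Python, and the
-- equivalence proved here is about the RETURN value only (stated for perm/val threaded as state).
-- The fuel argument of the recursive helpers is a totalization guard only: (r - l).toNat fuel
-- always suffices, since each recursive call strictly shrinks the range.

-- ===== PORT A =====
-- state-threaded transliteration of A: returns (swaps_left, perm, val)
def buildAux : Nat → Int → Int → Int → List Int → List Int → Int × List Int × List Int
  | 0, _, _, s, p, v => (s, p, v)   -- never reached when fuel ≥ (r - l).toNat
  | fuel + 1, l, r, s, p, v =>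
    if l ≥ r then (s, p, v)
    else if l + 1 = r then
      (s,
       PySem.List.pySetD p l (PySem.List.pyGetD v 0 0),
       PySem.List.pySetD v 0 (PySem.List.pyGetD v 0 0 + 1))
    else
      let mid := PySem.Int.floordiv (l + r) 2
      let s1 := buildAux fuel l mid s p v
      let s2 := buildAux fuel mid r s1.1 s1.2.1 s1.2.2
      if s2.1 > 0 then
        (s2.1 - 1,
         PySem.List.pySetD (PySem.List.pySetD s2.2.1 (mid - 1) (PySem.List.pyGetD s2.2.1 mid 0))
           mid (PySem.List.pyGetD s2.2.1 (mid - 1) 0),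
         s2.2.2)
      else s2

def build (l : Int) (r : Int) (swaps_left : Int) (perm : List Int) (val : List Int) : Int :=
  (buildAux (r - l).toNat l r swaps_left perm val).1

-- ===== PORT B =====
-- transliteration of Source B's _mids (the Python list 'acc' is threaded; acc.append adds at the end)
def midsB : Nat → Int → Int → List Int → List Int
  | 0, _, _, acc => acc   -- never reached when fuel ≥ (hi - lo).toNat
  | fuel + 1, lo, hi, acc =>
    if hi - lo ≥ 2 then
      let mid := PySem.Int.floordiv (lo + hi) 2
      let acc1 := midsB fuel lo mid acc
      let acc2 := midsB fuel mid hi acc1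
      acc2 ++ [mid]
    else acc

-- Source B's final loop over mids (with its early break); returns (swaps_left, perm)
def swapLoop : List Int → Int → List Int → Int × List Int
  | [], s, p => (s, p)
  | mid :: rest, s, p =>
    if s ≤ 0 then (s, p)
    else
      swapLoop rest (s - 1)
        (PySem.List.pySetD (PySem.List.pySetD p (mid - 1) (PySem.List.pyGetD p mid 0))
          mid (PySem.List.pyGetD p (mid - 1) 0))

def build_alt (l : Int) (r : Int) (swaps_left : Int) (perm : List Int) (val : List Int) : Int :=
  if r ≤ l then swaps_left
  else
    let base := PySem.List.pyGetD val 0 0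
    let perm1 := (PySem.List.pyRange l r 1).foldl
      (fun p i => PySem.List.pySetD p i (base + (i - l))) perm
    let _val1 := PySem.List.pySetD val 0 (base + (r - l))
    let ms := midsB (r - l).toNat l r []
    (swapLoop ms swaps_left perm1).1

-- ===== PRECONDITION & SPEC =====
-- Pre_ excludes exactly the inputs on which the Python A raises (IndexError: val empty at a leaf,
-- or some visited index l..r-1 outside the valid [-len, len) range of perm); A returns everywhere else.
def Pre_build (l : Int) (r : Int) (swaps_left : Int) (perm : List Int) (val : List Int) : Prop :=
  l < r → (val ≠ [] ∧ r ≤ (perm.length : Int) ∧ -(perm.length : Int) ≤ l)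
instance (l : Int) (r : Int) (swaps_left : Int) (perm : List Int) (val : List Int) : Decidable (Pre_build l r swaps_left perm val) := by unfold Pre_build; infer_instance

def pvWitness_build : Int × Int × Int × List Int × List Int := (0, 3, 1, [7, 5, 6], [0])

def Spec_build (l : Int) (r : Int) (swaps_left : Int) (perm : List Int) (val : List Int) (out : Int) : Prop := out = build_alt l r swaps_left perm val
instance (l : Int) (r : Int) (swaps_left : Int) (perm : List Int) (val : List Int) (out : Int) : Decidable (Spec_build l r swaps_left perm val out) := by unfold Spec_build; infer_instance

-- ===== CLAIM (what is proved, stated in full; the proofs are below) =====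
def Claim_equal_build : Prop := ∀ (l : Int) (r : Int) (swaps_left : Int) (perm : List Int) (val : List Int), Dom_build l r swaps_left perm val → Pre_build l r swaps_left perm val → Spec_build l r swaps_left perm val (build l r swaps_left perm val)

-- ===== LEMMAS AND PROOFS =====

-- one step of the budget consumption
def decSwap (s : Int) : Int := if s > 0 then s - 1 else s

theorem decSwap_iterate_nonpos (n : Nat) (s : Int) (h : s ≤ 0) : decSwap^[n] s = s := by
  induction n with
  | zero => rfl
  | succ n ih =>
    rw [Function.iterate_succ_apply]
    have : decSwap s = s := by simp [decSwap]; omega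
    rw [this, ih]

theorem swapLoop_fst (mids : List Int) : ∀ (s : Int) (p : List Int),
    (swapLoop mids s p).1 = decSwap^[mids.length] s := by
  induction mids with
  | nil => intro s p; rfl
  | cons m rest ih =>
    intro s p
    rw [swapLoop]
    by_cases hs : s ≤ 0
    · simp only [if_pos hs, List.length_cons, Function.iterate_succ_apply]
      have : decSwap s = s := by simp [decSwap]; omega
      rw [this, decSwap_iterate_nonpos _ _ hs]
    · simp only [if_neg hs, List.length_cons, Function.iterate_succ_apply]
      have : decSwap s = s - 1 := by simp [decSwap]; omega
      rw [this, ih]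

theorem midsB_acc (fuel : Nat) : ∀ (lo hi : Int) (acc : List Int),
    midsB fuel lo hi acc = acc ++ midsB fuel lo hi [] := by
  induction fuel with
  | zero => intro lo hi acc; simp [midsB]
  | succ fuel ih =>
    intro lo hi acc
    rw [midsB, midsB]
    by_cases h2 : hi - lo ≥ 2
    · simp only [if_pos h2]
      rw [ih _ _ acc, ih _ _ (acc ++ midsB fuel lo (PySem.Int.floordiv (lo + hi) 2) []),
          ih _ _ (midsB fuel lo (PySem.Int.floordiv (lo + hi) 2) [])]
      simp
    · simp [h2]

theorem buildAux_fst (fuel : Nat) : ∀ (l r s : Int) (p v : List Int), (r - l).toNat ≤ fuel →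
    (buildAux fuel l r s p v).1 = decSwap^[(midsB fuel l r []).length] s := by
  induction fuel with
  | zero => intro l r s p v h; rfl
  | succ fuel ih =>
    intro l r s p v h
    rw [buildAux, midsB]
    by_cases h1 : l ≥ r
    · have h2 : ¬ (r - l ≥ 2) := by omega
      simp [h1, h2]
    · by_cases h2 : l + 1 = r
      · have h3 : ¬ (r - l ≥ 2) := by omega
        simp [h1, h2, h3]
      · have h3 : r - l ≥ 2 := by omega
        simp only [if_neg h1, if_neg h2, if_pos h3]
        have hm : PySem.Int.floordiv (l + r) 2 = (l + r) / 2 :=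
          PySem.Int.floordiv_eq_ediv_of_pos (by omega)
        have hL : ((PySem.Int.floordiv (l + r) 2) - l).toNat ≤ fuel := by omega
        have hR : (r - (PySem.Int.floordiv (l + r) 2)).toNat ≤ fuel := by omega
        set mid := PySem.Int.floordiv (l + r) 2 with hmid
        have e1 := ih l mid s p v hL
        set s1 := buildAux fuel l mid s p v with hs1
        have e2 := ih mid r s1.1 s1.2.1 s1.2.2 hR
        set s2 := buildAux fuel mid r s1.1 s1.2.1 s1.2.2 with hs2
        have hmids : midsB fuel mid r (midsB fuel l mid []) =
            midsB fuel l mid [] ++ midsB fuel mid r [] := midsB_acc fuel mid r _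
        have hfst : (if s2.1 > 0 then
            (s2.1 - 1,
             PySem.List.pySetD (PySem.List.pySetD s2.2.1 (mid - 1) (PySem.List.pyGetD s2.2.1 mid 0))
               mid (PySem.List.pyGetD s2.2.1 (mid - 1) 0),
             s2.2.2)
          else s2).1 = decSwap s2.1 := by
          by_cases hp : s2.1 > 0 <;> simp [hp, decSwap]
        rw [hfst, e2, e1, hmids]
        simp only [List.length_append, List.length_cons, List.length_nil]
        have hiter : ∀ (m : Nat) (x : Int), decSwap (decSwap^[m] x) = decSwap^[m + 1] x :=
          fun m x => (Function.iterate_succ_apply' decSwap m x).symm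
        rw [← Function.iterate_add_apply, hiter]
        congr 1
        omega

-- ===== VERDICT (by name: the statement is the Claim_ definition above) =====
theorem build_spec : Claim_equal_build := by
  intro l r s perm val _hdom _hpre
  unfold Spec_build build build_alt
  by_cases hrl : r ≤ l
  · have hz : (r - l).toNat = 0 := by omega
    rw [hz, buildAux]
    simp [hrl]
  · simp only [if_neg hrl]
    rw [buildAux_fst (r - l).toNat l r s perm val le_rfl, swapLoop_fst]
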